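-- pv_equiv track=rewrite | github.com/AlbertMargaryan/Python_CPS109_Problems_Solution | main.py | nearest_smaller
-- ===== SOURCE A (Python) =====
-- def nearest_smaller(items):
--     result = []
--     for i, v in enumerate(items):
--         for k in range(1,max(len(items)-i+1, i)+1):
--             start = 0 if i-k <= 0 else i-k
--             end = len(items)-1 if i+k >= len(items) else i+k
--             minInKRange = min(items[start:end+1])
--             if not minInKRange == v:
--                 result.append(minInKRange)
--                 break
--             if start == 0 and end == len(items)-1 or v==min(items):
--                 result.append(v)
--                 break
--     return result
-- ===== SOURCE B (Python) =====
-- def nearest_smaller(items):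
--     # Expand outward from each index, inspecting only the two boundary
--     # elements at each distance instead of re-slicing and re-scanning
--     # the whole window like A does.
--     n = len(items)
--     result = []
--     for i, v in enumerate(items):
--         ans = v
--         d = 1
--         while ans == v and (d <= i or i + d < n):
--             if d <= i and items[i - d] < ans:
--                 ans = items[i - d]
--             if i + d < n and items[i + d] < ans:
--                 ans = items[i + d]
--             d += 1
--         result.append(ans)
--     return result
-- ===== Notes on version B (the rewrite author's own statement) =====
-- stated objective: faster
-- what changed: Instead of re-slicing and re-scanning the whole symmetric window at every radius (and recomputing min(items)), B expands the radius checking only the two new boundary elements, keeping a running best.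
import Mathlib
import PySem

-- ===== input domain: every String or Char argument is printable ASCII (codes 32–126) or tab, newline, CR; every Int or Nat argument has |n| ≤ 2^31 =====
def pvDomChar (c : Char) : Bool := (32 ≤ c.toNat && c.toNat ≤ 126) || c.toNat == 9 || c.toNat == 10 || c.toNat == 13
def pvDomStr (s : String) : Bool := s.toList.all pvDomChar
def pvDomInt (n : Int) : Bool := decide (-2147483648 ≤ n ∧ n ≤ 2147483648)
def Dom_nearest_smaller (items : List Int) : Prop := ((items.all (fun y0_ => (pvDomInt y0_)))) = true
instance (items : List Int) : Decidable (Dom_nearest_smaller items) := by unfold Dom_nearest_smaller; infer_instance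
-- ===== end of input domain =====

-- B replaces A's full-window re-scan at every radius by checking only the two new
-- boundary elements per radius (objective: faster on inputs where the nearest
-- smaller element is far away).

-- ===== PORT A =====
-- Python min(xs): xs is nonempty wherever A evaluates it, so the getD default is never used.
def pvMin (xs : List Int) : Int := (PySem.List.min? xs (fun x => x)).getD 0

-- A's inner `for k in range(...)` loop with its break, as structural recursion on the range list.
def pvAInner (items : List Int) (i v : Int) : List Int → List Int
  | [] => []
  | k :: ks =>
    let n : Int := items.length
    let start : Int := if i - k ≤ 0 then 0 else i - k
    let e : Int := if i + k ≥ n then n - 1 else i + k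
    let minInKRange : Int := pvMin (PySem.List.slice items (some start) (some (e + 1)))
    if ¬ (minInKRange = v) then [minInKRange]
    else if (start = 0 ∧ e = n - 1) ∨ v = pvMin items then [v]
    else pvAInner items i v ks

def nearest_smaller (items : List Int) : List Int :=
  (PySem.List.enumerate items 0).foldl
    (fun result p =>
      result ++ pvAInner items p.1 p.2
        (PySem.List.pyRange 1 (max ((items.length : Int) - p.1 + 1) p.1 + 1) 1))
    []

-- ===== PORT B =====
-- B's `while` loop; the fuel `items.length` only makes the recursion total
-- (the loop condition forces d < n, so fuel never runs out on reached inputs).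
def pvBLoop (items : List Int) (n i v : Int) : Nat → Int → Int → Int
  | 0, _, ans => ans
  | fuel + 1, d, ans =>
    if ans = v ∧ (d ≤ i ∨ i + d < n) then
      let a1 : Int := if d ≤ i ∧ PySem.List.pyGetD items (i - d) 0 < ans
        then PySem.List.pyGetD items (i - d) 0 else ans
      let a2 : Int := if i + d < n ∧ PySem.List.pyGetD items (i + d) 0 < a1
        then PySem.List.pyGetD items (i + d) 0 else a1
      pvBLoop items n i v fuel (d + 1) a2
    else ans

def nearest_smaller_alt (items : List Int) : List Int :=
  (PySem.List.enumerate items 0).foldl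
    (fun result p =>
      result ++ [pvBLoop items (items.length : Int) p.1 p.2 items.length 1 p.2])
    []

-- ===== PRECONDITION & SPEC =====
def Spec_nearest_smaller (items : List Int) (out : List Int) : Prop := out = nearest_smaller_alt items
instance (items : List Int) (out : List Int) : Decidable (Spec_nearest_smaller items out) := by unfold Spec_nearest_smaller; infer_instance

-- ===== CLAIM (what is proved, stated in full; the proofs are below) =====
def Claim_equal_nearest_smaller : Prop := ∀ (items : List Int), Dom_nearest_smaller items → Spec_nearest_smaller items (nearest_smaller items)

-- ===== LEMMAS AND PROOFS =====

-- B's one-step update starting from ans = v at radius k (proof-only helper).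
def pvStep (items : List Int) (n i v k : Int) : Int :=
  let a1 : Int := if k ≤ i ∧ PySem.List.pyGetD items (i - k) 0 < v
    then PySem.List.pyGetD items (i - k) 0 else v
  if i + k < n ∧ PySem.List.pyGetD items (i + k) 0 < a1
    then PySem.List.pyGetD items (i + k) 0 else a1

lemma pvMin_eq {s : List Int} {m : Int} (hm : m ∈ s) (hub : ∀ x ∈ s, m ≤ x) :
    pvMin s = m := by
  have hne : s ≠ [] := by rintro rfl; simp at hm
  obtain ⟨m', hm'⟩ : ∃ m', PySem.List.min? s (fun x => x) = some m' := by
    cases h : PySem.List.min? s (fun x => x) with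
    | none => exact absurd ((PySem.List.min?_eq_none_iff _ _).mp h) hne
    | some m' => exact ⟨m', rfl⟩
  have h1 : m ≤ m' := hub m' (PySem.List.min?_mem hm')
  have h2 : m' ≤ m := PySem.List.min?_isMin hm' m hm
  simp [pvMin, hm', le_antisymm h2 h1]

lemma pvMin_le (s : List Int) (x : Int) (hx : x ∈ s) : pvMin s ≤ x := by
  have hne : s ≠ [] := by rintro rfl; simp at hx
  obtain ⟨m', hm'⟩ : ∃ m', PySem.List.min? s (fun x => x) = some m' := by
    cases h : PySem.List.min? s (fun x => x) with
    | none => exact absurd ((PySem.List.min?_eq_none_iff _ _).mp h) hne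
    | some m' => exact ⟨m', rfl⟩
  have := PySem.List.min?_isMin hm' x hx
  simpa [pvMin, hm'] using this

lemma mem_slice_int (xs : List Int) (a b x : Int) (ha : 0 ≤ a) (hb0 : 0 ≤ b)
    (hb : b ≤ (xs.length : Int)) :
    x ∈ PySem.List.slice xs (some a) (some b) ↔
      ∃ j : Int, a ≤ j ∧ j < b ∧ x = PySem.List.pyGetD xs j 0 := by
  rw [PySem.List.slice_toNat _ ha hb0, List.mem_iff_getElem]
  constructor
  · rintro ⟨k, hk, rfl⟩
    have hlen : k < min (b.toNat - a.toNat) (xs.length - a.toNat) := by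
      simpa [List.length_take, List.length_drop] using hk
    refine ⟨a + k, by omega, by omega, ?_⟩
    rw [PySem.List.pyGetD_eq_getElem _ _ (by omega) (by omega)]
    rw [List.getElem_take, List.getElem_drop]
    congr 1
    omega
  · rintro ⟨j, hja, hjb, rfl⟩
    have hj0 : 0 ≤ j := le_trans ha hja
    have hjlen : j.toNat < xs.length := by omega
    refine ⟨j.toNat - a.toNat, ?_, ?_⟩
    · simp [List.length_take, List.length_drop]; omega
    · rw [PySem.List.pyGetD_eq_getElem _ _ hj0 (by omega)]
      rw [List.getElem_take, List.getElem_drop]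
      congr 1
      omega

-- the window minimum A computes at radius k equals B's boundary-only update,
-- given that everything at distance < k is ≥ v = items[i]
lemma pvWindowMin (items : List Int) (i v k : Int)
    (hi0 : 0 ≤ i) (hin : i < (items.length : Int)) (hk : 1 ≤ k)
    (hv : v = PySem.List.pyGetD items i 0)
    (H : ∀ j : Int, 0 ≤ j → j < (items.length : Int) → i - k < j → j < i + k →
      v ≤ PySem.List.pyGetD items j 0) :
    pvMin (PySem.List.slice items (some (if i - k ≤ 0 then 0 else i - k))
        (some ((if i + k ≥ (items.length : Int) then (items.length : Int) - 1 else i + k) + 1)))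
      = pvStep items (items.length : Int) i v k := by
  set n : Int := (items.length : Int) with hn
  set start : Int := if i - k ≤ 0 then 0 else i - k with hstart
  set e : Int := if i + k ≥ n then n - 1 else i + k with he
  have hsf : 0 ≤ start ∧ start ≤ i ∧ i - k ≤ start := by
    rw [hstart]; split_ifs <;> omega
  have hef : e ≤ n - 1 ∧ i ≤ e ∧ e ≤ i + k := by
    rw [he]; split_ifs <;> omega
  set L : Int := PySem.List.pyGetD items (i - k) 0 with hL
  set R : Int := PySem.List.pyGetD items (i + k) 0 with hR
  have hLmem : k ≤ i → start ≤ i - k := by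
    rw [hstart]; split_ifs <;> omega
  have hRmem : i + k < n → i + k ≤ e := by
    rw [he]; split_ifs <;> omega
  have hunf : pvStep items n i v k =
      (if i + k < n ∧ R < (if k ≤ i ∧ L < v then L else v) then R
        else (if k ≤ i ∧ L < v then L else v)) := by
    simp only [pvStep, ← hL, ← hR]
  set a1 : Int := if k ≤ i ∧ L < v then L else v with ha1def
  set a2 : Int := if i + k < n ∧ R < a1 then R else a1 with ha2def
  rw [hunf]
  have a1f : a1 ≤ v ∧ (k ≤ i → a1 ≤ L) ∧ (a1 = v ∨ (a1 = L ∧ k ≤ i)) := by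
    rw [ha1def]; split_ifs with h
    · exact ⟨le_of_lt h.2, fun _ => le_refl _, Or.inr ⟨rfl, h.1⟩⟩
    · refine ⟨le_refl _, ?_, Or.inl rfl⟩
      intro hki
      by_cases hLv : L < v
      · exact absurd ⟨hki, hLv⟩ h
      · omega
  have a2f : a2 ≤ v ∧ (k ≤ i → a2 ≤ L) ∧ (i + k < n → a2 ≤ R) ∧
      (a2 = v ∨ (a2 = L ∧ k ≤ i) ∨ (a2 = R ∧ i + k < n)) := by
    rw [ha2def]; split_ifs with h
    · obtain ⟨h1, h2⟩ := h
      refine ⟨by omega, fun hki => ?_, fun _ => le_refl _, Or.inr (Or.inr ⟨rfl, h1⟩)⟩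
      have := a1f.2.1 hki; omega
    · refine ⟨a1f.1, a1f.2.1, ?_, ?_⟩
      · intro hkn
        by_cases hRa : R < a1
        · exact absurd ⟨hkn, hRa⟩ h
        · omega
      · rcases a1f.2.2 with h0 | h0
        · exact Or.inl h0
        · exact Or.inr (Or.inl h0)
  apply pvMin_eq
  · rw [mem_slice_int _ _ _ _ (by omega) (by omega) (by omega)]
    rcases a2f.2.2.2 with h0 | ⟨h0, hki⟩ | ⟨h0, hkn⟩
    · exact ⟨i, by omega, by omega, by rw [h0, hv]⟩
    · exact ⟨i - k, hLmem hki, by omega, by rw [h0, hL]⟩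
    · exact ⟨i + k, by omega, by have := hRmem hkn; omega, by rw [h0, hR]⟩
  · intro x hx
    rw [mem_slice_int _ _ _ _ (by omega) (by omega) (by omega)] at hx
    obtain ⟨j, hj1, hj2, rfl⟩ := hx
    have htri : j = i - k ∨ j = i + k ∨ (i - k < j ∧ j < i + k) := by omega
    rcases htri with h0 | h0 | ⟨h1, h2⟩
    · subst h0
      have hki : k ≤ i := by omega
      exact le_trans (a2f.2.1 hki) (by rw [hL])
    · subst h0
      have hkn : i + k < n := by omega
      exact le_trans (a2f.2.2.1 hkn) (by rw [hR])
    · exact le_trans a2f.1 (H j (by omega) (by omega) h1 h2)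

lemma pvStep_eq_v (items : List Int) (n i v k : Int) (h : pvStep items n i v k = v) :
    (k ≤ i → v ≤ PySem.List.pyGetD items (i - k) 0) ∧
      (i + k < n → v ≤ PySem.List.pyGetD items (i + k) 0) := by
  simp only [pvStep] at h
  split_ifs at h with h1 h2 h3 <;> constructor <;> intro h' <;> omega

lemma pvBLoop_stuck (items : List Int) (n i v ans : Int) (fuel : Nat) (d : Int)
    (h : ans ≠ v) : pvBLoop items n i v fuel d ans = ans := by
  cases fuel <;> simp [pvBLoop, h]

lemma pvBLoop_min (items : List Int) (i v : Int)
    (Hall : ∀ j : Int, 0 ≤ j → j < (items.length : Int) → v ≤ PySem.List.pyGetD items j 0)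
    (hi0 : 0 ≤ i) (hin : i < (items.length : Int)) :
    ∀ (fuel : Nat) (d : Int), 1 ≤ d →
      pvBLoop items (items.length : Int) i v fuel d v = v := by
  intro fuel
  induction fuel with
  | zero => intro d hd; rfl
  | succ f ih =>
    intro d hd
    have h1 : ¬ (d ≤ i ∧ PySem.List.pyGetD items (i - d) 0 < v) := by
      rintro ⟨ha, hb⟩
      have := Hall (i - d) (by omega) (by omega); omega
    have h2 : ¬ (i + d < (items.length : Int) ∧ PySem.List.pyGetD items (i + d) 0 < v) := by
      rintro ⟨ha, hb⟩
      have := Hall (i + d) (by omega) (by omega); omega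
    rw [pvBLoop]
    simp only [h1, if_false]
    simp only [h2, if_false]
    split_ifs with hc
    · exact ih (d + 1) (by omega)
    · rfl

lemma pvMain (items : List Int) (i v : Int) :
    ∀ (fuel : Nat) (k : Int),
    0 ≤ i → i < (items.length : Int) → 1 ≤ k →
    k ≤ max ((items.length : Int) - i + 1) i →
    (items.length : Int) ≤ (fuel : Int) + k →
    v = PySem.List.pyGetD items i 0 →
    (∀ j : Int, 0 ≤ j → j < (items.length : Int) → i - k < j → j < i + k →
      v ≤ PySem.List.pyGetD items j 0) →
    pvAInner items i v (PySem.List.pyRange k (max ((items.length : Int) - i + 1) i + 1) 1)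
      = [pvBLoop items (items.length : Int) i v fuel k v] := by
  intro fuel
  induction fuel with
  | zero =>
    intro k hi0 hin hk hK hfuel hv H
    have hmax1 := le_max_left ((items.length : Int) - i + 1) i
    have hmax2 := le_max_right ((items.length : Int) - i + 1) i
    have hkn : (items.length : Int) ≤ k := by push_cast at hfuel; omega
    rw [PySem.List.pyRange_one_cons (by omega)]
    simp only [pvAInner]
    rw [pvWindowMin items i v k hi0 hin hk hv H]
    have g1 : ¬ (k ≤ i ∧ PySem.List.pyGetD items (i - k) 0 < v) := by
      rintro ⟨h, _⟩; omega
    have g2 : ¬ (i + k < (items.length : Int) ∧ PySem.List.pyGetD items (i + k) 0 < v) := by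
      rintro ⟨h, _⟩; omega
    have hstep : pvStep items (items.length : Int) i v k = v := by
      simp only [pvStep, g1, if_false]
      rw [if_neg g2]
    rw [hstep]
    rw [if_pos (show i - k ≤ 0 by omega), if_pos (show i + k ≥ (items.length : Int) by omega)]
    simp [pvBLoop]
  | succ f ih =>
    intro k hi0 hin hk hK hfuel hv H
    have hmax1 := le_max_left ((items.length : Int) - i + 1) i
    have hmax2 := le_max_right ((items.length : Int) - i + 1) i
    rw [PySem.List.pyRange_one_cons (by omega)]
    simp only [pvAInner]
    rw [pvWindowMin items i v k hi0 hin hk hv H]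
    by_cases hmv : pvStep items (items.length : Int) i v k = v
    · rw [hmv]
      rw [if_neg (by simp)]
      obtain ⟨hLb, hRb⟩ := pvStep_eq_v items (items.length : Int) i v k hmv
      by_cases hC : ((if i - k ≤ 0 then 0 else i - k) = 0 ∧
          (if i + k ≥ (items.length : Int) then (items.length : Int) - 1 else i + k)
            = (items.length : Int) - 1) ∨ v = pvMin items
      · rw [if_pos hC]
        have Hall : ∀ j : Int, 0 ≤ j → j < (items.length : Int) →
            v ≤ PySem.List.pyGetD items j 0 := by
          rcases hC with ⟨hs0, he1⟩ | hvm
          · have hc1 : i - k ≤ 0 := by split_ifs at hs0 <;> omega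
            have hc2 : (items.length : Int) - 1 ≤ i + k := by split_ifs at he1 <;> omega
            intro j h0 hj
            have htri : j = i - k ∨ j = i + k ∨ (i - k < j ∧ j < i + k) := by omega
            rcases htri with h | h | ⟨h1, h2⟩
            · subst h; exact hLb (by omega)
            · subst h; exact hRb (by omega)
            · exact H j h0 hj h1 h2
          · intro j h0 hj
            rw [PySem.List.pyGetD_eq_getElem _ _ h0 hj, hvm]
            exact pvMin_le items _ (List.getElem_mem _)
        rw [pvBLoop_min items i v Hall hi0 hin (f + 1) k (by omega)]
      · rw [if_neg hC]
        have hncov : ¬ ((if i - k ≤ 0 then 0 else i - k) = 0 ∧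
            (if i + k ≥ (items.length : Int) then (items.length : Int) - 1 else i + k)
              = (items.length : Int) - 1) := fun h => hC (Or.inl h)
        have hstrong : k < i ∨ i + k < (items.length : Int) - 1 := by
          by_cases c1 : i - k ≤ 0
          · by_cases c3 : i + k < (items.length : Int) - 1
            · omega
            · exfalso
              apply hncov
              refine ⟨by rw [if_pos c1], ?_⟩
              split_ifs with c2
              · rfl
              · omega
          · omega
        have g1 : ¬ (k ≤ i ∧ PySem.List.pyGetD items (i - k) 0 < v) := by
          rintro ⟨a, b⟩; have := hLb a; omega
        have g2 : ¬ (i + k < (items.length : Int) ∧ PySem.List.pyGetD items (i + k) 0 < v) := by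
          rintro ⟨a, b⟩; have := hRb a; omega
        rw [pvBLoop]
        rw [if_pos ⟨rfl, by omega⟩]
        simp only [g1, if_false]
        simp only [g2, if_false]
        have hH' : ∀ j : Int, 0 ≤ j → j < (items.length : Int) →
            i - (k + 1) < j → j < i + (k + 1) → v ≤ PySem.List.pyGetD items j 0 := by
          intro j h0 hj h1 h2
          have htri : j = i - k ∨ j = i + k ∨ (i - k < j ∧ j < i + k) := by omega
          rcases htri with h | h | ⟨ha, hb⟩
          · subst h; exact hLb (by omega)
          · subst h; exact hRb (by omega)
          · exact H j h0 hj ha hb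
        exact ih (k + 1) hi0 hin (by omega) (by omega) (by push_cast at hfuel ⊢; omega) hv hH'
    · rw [if_pos hmv]
      rw [pvBLoop]
      have hcond : k ≤ i ∨ i + k < (items.length : Int) := by
        by_contra hno
        push Not at hno
        apply hmv
        simp only [pvStep]
        rw [if_neg (by rintro ⟨a, _⟩; omega), if_neg (by rintro ⟨a, _⟩; omega)]
      rw [if_pos ⟨rfl, hcond⟩]
      show _ = [pvBLoop items (items.length : Int) i v f (k + 1) (pvStep items (items.length : Int) i v k)]
      rw [pvBLoop_stuck items (items.length : Int) i v _ f (k + 1) hmv]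

lemma foldl_app_congr {α β : Type} (l : List α) (f g : α → List β)
    (h : ∀ p ∈ l, f p = g p) :
    ∀ acc, l.foldl (fun r p => r ++ f p) acc = l.foldl (fun r p => r ++ g p) acc := by
  induction l with
  | nil => intro acc; rfl
  | cons x t ih =>
    intro acc
    simp only [List.foldl_cons, h x (by simp)]
    exact ih (fun p hp => h p (by simp [hp])) _

-- ===== VERDICT (by name: the statement is the Claim_ definition above) =====
theorem nearest_smaller_spec : Claim_equal_nearest_smaller := by
  intro items _
  unfold Spec_nearest_smaller nearest_smaller nearest_smaller_alt
  refine foldl_app_congr _ _ _ ?_ []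
  intro p hp
  rw [PySem.List.mem_enumerate_iff] at hp
  obtain ⟨j, hj, rfl⟩ := hp
  simp only [Int.zero_add]
  refine pvMain items (j : Int) items[j] items.length 1 (by positivity) (by exact_mod_cast hj)
    le_rfl ?_ (by omega) ?_ ?_
  · have : (1:Int) ≤ (items.length : Int) - j := by
      have := (Int.ofNat_lt.mpr hj); omega
    omega
  · simp [PySem.List.pyGetD_natCast, List.getD_eq_getElem?_getD, hj]
  · intro m h0 hm h1 h2
    have : m = (j : Int) := by omega
    subst this
    simp [PySem.List.pyGetD_natCast, List.getD_eq_getElem?_getD, hj]
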